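-- pv_equiv track=rewrite | github.com/dmorales22/CS2302-Data-Structures-Labs | LAB5A/Heap.py | caps_detector
-- ===== SOURCE A (Python) =====
-- def caps_detector(char): #Checks if a letter is capitalized, then returns the lower case equalivent if the letter is capitalized.
--     cap_list = ['A', 'B', 'C', 'D', 'E', 'F', 'G', 'H', 'I', 'J', 'K', 'L', 'N', 'M', 'O', 'P', 'Q', 'R', 'S', 'T', 'U', 'V', 'W', 'X', 'Y', 'Z']
--     lower_list = ['a', 'b', 'c', 'd', 'e', 'f', 'g', 'h', 'i', 'j', 'k', 'l', 'n', 'm', 'o', 'p', 'q', 'r', 's', 't', 'u', 'v', 'w', 'x', 'y', 'z']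
--
--     lower_char = ''
--     for i in range(len(cap_list)):
--         if (char == cap_list[i]):
--             lower_char = lower_list[i]
--             return lower_char
--
--     return char
-- ===== SOURCE B (Python) =====
-- def caps_detector(char):
--     # Closed-form: single capital letter -> code-shifted lowercase; anything else unchanged.
--     if isinstance(char, str) and len(char) == 1 and 'A' <= char <= 'Z':
--         return chr(ord(char) + 32)
--     return char
-- ===== Notes on version B (the rewrite author's own statement) =====
-- stated objective: idiomatic
-- what changed: Replaces the 26-entry parallel-list scan with a closed-form character-code computation (chr(ord(c)+32) guarded by a single range test).
import Mathlib
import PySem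

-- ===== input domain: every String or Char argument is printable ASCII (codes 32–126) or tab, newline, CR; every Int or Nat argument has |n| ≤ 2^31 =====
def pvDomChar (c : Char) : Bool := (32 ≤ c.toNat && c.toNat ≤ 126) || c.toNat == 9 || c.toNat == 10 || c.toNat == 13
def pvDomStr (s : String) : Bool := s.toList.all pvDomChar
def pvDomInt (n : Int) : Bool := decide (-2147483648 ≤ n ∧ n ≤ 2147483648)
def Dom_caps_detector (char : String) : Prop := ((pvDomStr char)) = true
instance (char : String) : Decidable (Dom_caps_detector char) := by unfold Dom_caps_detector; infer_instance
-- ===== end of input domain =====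

-- B replaces A's 26-entry parallel-list scan with a closed-form character-code shift (more idiomatic; same result).


-- ===== PORT A =====
-- A pairs cap_list[i] with lower_list[i]; the loop with early return becomes a
-- structural recursion over the zipped literal list.
def capsLoop (char : String) : List (String × String) → Option String
  | [] => none
  | (c, l) :: rest => if char == c then some l else capsLoop char rest

def capsPairs : List (String × String) :=
  [("A","a"),("B","b"),("C","c"),("D","d"),("E","e"),("F","f"),("G","g"),
   ("H","h"),("I","i"),("J","j"),("K","k"),("L","l"),("N","n"),("M","m"),
   ("O","o"),("P","p"),("Q","q"),("R","r"),("S","s"),("T","t"),("U","u"),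
   ("V","v"),("W","w"),("X","x"),("Y","y"),("Z","z")]

def caps_detector (char : String) : String :=
  match capsLoop char capsPairs with
  | some l => l
  | none => char

-- ===== PORT B =====
-- B: if char is a single character between 'A' and 'Z', shift its code by 32; else unchanged.
def caps_detector_alt (char : String) : String :=
  match char.toList with
  | [c] => if 'A' ≤ c ∧ c ≤ 'Z' then String.ofList [Char.ofNat (c.toNat + 32)] else char
  | _ => char

-- ===== PRECONDITION & SPEC =====
def Spec_caps_detector (char : String) (out : String) : Prop := out = caps_detector_alt char
instance (char : String) (out : String) : Decidable (Spec_caps_detector char out) := by unfold Spec_caps_detector; infer_instance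

-- ===== CLAIM (what is proved, stated in full; the proofs are below) =====
def Claim_equal_caps_detector : Prop := ∀ (char : String), Dom_caps_detector char → Spec_caps_detector char (caps_detector char)

-- ===== LEMMAS AND PROOFS =====
theorem capsLoop_none (char : String) (h : char.toList.length ≠ 1) :
    capsLoop char capsPairs = none := by
  have ne : ∀ s : String, s.toList.length = 1 → ¬ (char = s) := by
    intro s hs he; exact h (he ▸ hs)
  simp only [capsPairs, capsLoop, beq_iff_eq]
  repeat rw [if_neg (ne _ (by decide))]

theorem single_case (c : Char) (h : pvDomChar c = true) :
    caps_detector (String.ofList [c]) = caps_detector_alt (String.ofList [c]) := by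
  have hb : 9 ≤ c.toNat ∧ c.toNat ≤ 126 := by
    simp [pvDomChar] at h; omega
  have hc : Char.ofNat c.toNat = c := Char.ofNat_toNat c
  obtain ⟨h1, h2⟩ := hb
  rw [← hc]
  generalize c.toNat = n at h1 h2
  interval_cases n <;> decide

-- ===== VERDICT (by name: the statement is the Claim_ definition above) =====
theorem caps_detector_spec : Claim_equal_caps_detector := by
  intro char hdom
  unfold Spec_caps_detector
  by_cases h1 : char.toList.length = 1
  · obtain ⟨c, hc⟩ := List.length_eq_one_iff.mp h1
    have hch : String.ofList [c] = char := by rw [← hc]; exact String.ofList_toList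
    have hdc : pvDomChar c = true := by
      have hd := hdom
      unfold Dom_caps_detector pvDomStr at hd
      rw [hc] at hd
      simpa using hd
    rw [← hch]
    exact single_case c hdc
  · unfold caps_detector caps_detector_alt
    rw [capsLoop_none char h1]
    rcases hl : char.toList with _ | ⟨c, _ | ⟨d, t⟩⟩
    · simp
    · exact absurd (show char.toList.length = 1 by rw [hl]; rfl) h1
    · simp
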